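-- pv_equiv track=rewrite | github.com/wipfli/font-maker | raqm/shape.py | split_embedding_levels
-- ===== SOURCE A (Python) =====
-- def split_embedding_levels(embedding_levels):
--     if len(embedding_levels) == 0:
--         return []
--
--     result = [] # [[0, 1], [1, 3], ..] with [from (including), to (excluding)]
--     sublist = [0, 0]
--
--     for i in range(1, len(embedding_levels)):
--         if embedding_levels[i - 1] != embedding_levels[i]:
--             sublist[1] = i
--             result.append(list(sublist))
--             sublist = [i, i]
--
--     sublist[1] = len(embedding_levels)
--     result.append(list(sublist))
--     return result
-- ===== SOURCE B (Python) =====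
-- def split_embedding_levels(embedding_levels):
--     n = len(embedding_levels)
--     if n == 0:
--         return []
--     boundaries = [0] + [i for i in range(1, n)
--                         if embedding_levels[i - 1] != embedding_levels[i]] + [n]
--     return [[a, b] for a, b in zip(boundaries, boundaries[1:])]
-- ===== Notes on version B (the rewrite author's own statement) =====
-- stated objective: simpler
-- what changed: Replaces the stateful run-tracking loop (mutable sublist, append-on-change, trailing flush) by two declarative phases: collect boundary indices, then pair consecutive boundaries.
import Mathlib
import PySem

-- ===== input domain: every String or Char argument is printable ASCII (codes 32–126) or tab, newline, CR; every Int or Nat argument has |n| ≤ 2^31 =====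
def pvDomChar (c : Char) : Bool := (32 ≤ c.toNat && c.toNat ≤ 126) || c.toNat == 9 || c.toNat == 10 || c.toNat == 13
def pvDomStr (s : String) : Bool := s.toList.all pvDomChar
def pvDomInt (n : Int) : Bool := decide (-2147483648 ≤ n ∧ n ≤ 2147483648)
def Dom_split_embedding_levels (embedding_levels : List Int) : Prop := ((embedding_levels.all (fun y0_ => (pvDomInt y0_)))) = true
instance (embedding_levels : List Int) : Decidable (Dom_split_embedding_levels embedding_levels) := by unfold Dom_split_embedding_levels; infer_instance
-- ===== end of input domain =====

-- B replaces A's stateful run-tracking loop by two phases (boundary indices, then consecutive pairing); simpler, same cost.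


-- ===== PORT A =====
-- literal port of A: fold over range(1, len) carrying (result, sublist) as in the Python loop
def split_embedding_levels (embedding_levels : List Int) : List (List Int) :=
  if embedding_levels.length = 0 then []
  else
    let st :=
      (PySem.List.pyRange 1 embedding_levels.length 1).foldl
        (fun (st : List (List Int) × Int × Int) i =>
          if PySem.List.pyGetD embedding_levels (i - 1) 0 ≠ PySem.List.pyGetD embedding_levels i 0 then
            (st.1 ++ [[st.2.1, i]], (i, i))
          else st)
        ([], (0, 0))
    st.1 ++ [[st.2.1, (embedding_levels.length : Int)]]

-- ===== PORT B =====
-- port of B: boundary indices, then consecutive pairs via zip with the tail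
def split_embedding_levels_alt (embedding_levels : List Int) : List (List Int) :=
  if embedding_levels.length = 0 then []
  else
    let boundaries : List Int :=
      0 :: ((PySem.List.pyRange 1 embedding_levels.length 1).filter
              (fun i => PySem.List.pyGetD embedding_levels (i - 1) 0 ≠ PySem.List.pyGetD embedding_levels i 0)
            ++ [(embedding_levels.length : Int)])
    (boundaries.zip boundaries.tail).map (fun q => [q.1, q.2])

-- ===== PRECONDITION & SPEC =====
def Spec_split_embedding_levels (embedding_levels : List Int) (out : List (List Int)) : Prop := out = split_embedding_levels_alt embedding_levels
instance (embedding_levels : List Int) (out : List (List Int)) : Decidable (Spec_split_embedding_levels embedding_levels out) := by unfold Spec_split_embedding_levels; infer_instance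

-- ===== CLAIM (what is proved, stated in full; the proofs are below) =====
def Claim_equal_split_embedding_levels : Prop := ∀ (embedding_levels : List Int), Dom_split_embedding_levels embedding_levels → Spec_split_embedding_levels embedding_levels (split_embedding_levels embedding_levels)

-- ===== LEMMAS AND PROOFS =====

-- consecutive pairs of a boundary list, as B builds them
def pvPairs (bs : List Int) : List (List Int) :=
  (bs.zip bs.tail).map (fun q => [q.1, q.2])

theorem pvPairs_cons_cons (s m : Int) (rest : List Int) :
    pvPairs (s :: m :: rest) = [s, m] :: pvPairs (m :: rest) := by
  simp [pvPairs]

-- A's fold, with trailing flush appended, equals the accumulated result plus B's pairing of the boundaries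
theorem pv_fold_eq (el : List Int) (n : Int) :
    ∀ (L : List Int) (res : List (List Int)) (s t : Int),
      (L.foldl
        (fun (st : List (List Int) × Int × Int) i =>
          if PySem.List.pyGetD el (i - 1) 0 ≠ PySem.List.pyGetD el i 0 then
            (st.1 ++ [[st.2.1, i]], (i, i))
          else st)
        (res, (s, t))).1
        ++ [[(L.foldl
          (fun (st : List (List Int) × Int × Int) i =>
            if PySem.List.pyGetD el (i - 1) 0 ≠ PySem.List.pyGetD el i 0 then
              (st.1 ++ [[st.2.1, i]], (i, i))
            else st)
          (res, (s, t))).2.1, n]]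
      = res ++ pvPairs (s :: (L.filter
          (fun i => PySem.List.pyGetD el (i - 1) 0 ≠ PySem.List.pyGetD el i 0) ++ [n])) := by
  intro L
  induction L with
  | nil => intro res s t; simp [pvPairs]
  | cons a L ih =>
      intro res s t
      by_cases h : PySem.List.pyGetD el (a - 1) 0 = PySem.List.pyGetD el a 0
      · simpa [h] using ih res s t
      · simp only [List.foldl_cons, List.filter_cons, ne_eq, h, not_false_eq_true,
          decide_true, if_true, List.cons_append]
        rw [pvPairs_cons_cons, ih (res ++ [[s, a]]) a a]
        simp

-- ===== VERDICT (by name: the statement is the Claim_ definition above) =====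
theorem split_embedding_levels_spec : Claim_equal_split_embedding_levels := by
  intro el _
  unfold Spec_split_embedding_levels split_embedding_levels split_embedding_levels_alt
  by_cases h : el.length = 0
  · simp [h]
  · simp only [h, if_false]
    simpa using pv_fold_eq el el.length (PySem.List.pyRange 1 el.length 1) [] 0 0
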